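-- pv_equiv track=rewrite | github.com/angryscan/angryscan.org | scripts/translate_docs.py | find_headers_with_numbers
-- ===== SOURCE A (Python) =====
-- from typing import Iterable, Iterator, List, Tuple
--
-- def find_headers_with_numbers(lines: List[str]) -> Tuple[dict, dict]:
--     """
--     Find all h1 and h2 headers and assign numbers.
--     Returns (h1_dict, h2_dict) where:
--     - h1_dict: {number: (index, text)}
--     - h2_dict: {h1_number: {h2_number: (index, text)}}
--     """
--     h1_dict = {}
--     h2_dict = {}
--     h1_counter = 0
--     h2_counters = {}  # Track h2 counters per h1
--
--     for i, line in enumerate(lines):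
--         stripped = line.strip()
--         if stripped.startswith('# '):
--             h1_counter += 1
--             h1_dict[h1_counter] = (i, stripped)
--             h2_counters[h1_counter] = 0
--         elif stripped.startswith('## '):
--             # Find which h1 this h2 belongs to
--             current_h1 = h1_counter
--             if current_h1 > 0:
--                 if current_h1 not in h2_dict:
--                     h2_dict[current_h1] = {}
--                 h2_counters[current_h1] += 1
--                 h2_number = h2_counters[current_h1]
--                 h2_dict[current_h1][h2_number] = (i, stripped)
--
--     return h1_dict, h2_dict
-- ===== SOURCE B (Python) =====
-- from typing import List, Tuple
--
-- def find_headers_with_numbers(lines: List[str]) -> Tuple[dict, dict]: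
--     # Two-pass: collect the h1 header lines first, then number each
--     # section's '## ' headers from that section's half-open line range.
--     stripped = [line.strip() for line in lines]
--     h1s = [(i, s) for i, s in enumerate(stripped) if s.startswith('# ')]
--     h1_dict = dict(enumerate(h1s, 1))
--     nexts = ([i for i, _ in h1s] + [len(lines)])[1:]
--     h2_dict = {}
--     for n, ((start, _), end) in enumerate(zip(h1s, nexts), 1):
--         subs = [(i, s) for i, s in enumerate(stripped[start + 1:end], start + 1)
--                 if s.startswith('## ')]
--         if subs:
--             h2_dict[n] = dict(enumerate(subs, 1))
--     return h1_dict, h2_dict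
-- ===== Notes on version B (the rewrite author's own statement) =====
-- stated objective: alternative
-- what changed: Replaces the single stateful pass with four dicts/counters by a two-phase plan: first collect all h1 header lines, then derive each section's half-open line range from consecutive h1 positions and number that slice's h2 headers positionally.
import Mathlib
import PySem

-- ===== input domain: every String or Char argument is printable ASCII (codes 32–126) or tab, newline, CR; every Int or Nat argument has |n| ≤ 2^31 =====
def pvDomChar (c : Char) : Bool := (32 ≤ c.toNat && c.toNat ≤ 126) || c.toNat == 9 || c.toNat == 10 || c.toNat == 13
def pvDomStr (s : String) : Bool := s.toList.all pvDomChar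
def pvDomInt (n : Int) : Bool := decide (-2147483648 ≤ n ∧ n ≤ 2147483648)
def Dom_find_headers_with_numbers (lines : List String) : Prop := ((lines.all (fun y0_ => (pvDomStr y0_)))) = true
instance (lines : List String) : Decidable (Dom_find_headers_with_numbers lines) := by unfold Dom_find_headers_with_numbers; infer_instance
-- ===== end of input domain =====

-- B replaces A's single stateful pass (four dicts/counters) by a two-phase plan: collect the h1
-- header lines first, then number each section's '## ' headers from its half-open line range
-- (objective: alternative decomposition, same cost; equality proved on all inputs in Dom).

-- ===== PORT A =====
-- the body of A's 'for i, line in enumerate(lines)' loop; state = (h1_dict, h2_dict, h1_counter, h2_counters)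
def find_headers_with_numbers_step
    (st : PySem.Dict Int (Int × String) × PySem.Dict Int (PySem.Dict Int (Int × String)) × Int × PySem.Dict Int Int)
    (p : Int × String) :
    PySem.Dict Int (Int × String) × PySem.Dict Int (PySem.Dict Int (Int × String)) × Int × PySem.Dict Int Int :=
  let stripped := PySem.Str.strip p.2
  if PySem.Str.startswith stripped "# " then
    (st.1.insert (st.2.2.1 + 1) (p.1, stripped), st.2.1, st.2.2.1 + 1, st.2.2.2.insert (st.2.2.1 + 1) 0)
  else if PySem.Str.startswith stripped "## " then
    if st.2.2.1 > 0 then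
      let h2d := if st.2.1.contains st.2.2.1 then st.2.1 else st.2.1.insert st.2.2.1 PySem.Dict.empty
      let ctr := st.2.2.2.modify st.2.2.1 0 (· + 1)
      (st.1, h2d.modify st.2.2.1 PySem.Dict.empty (fun inner => inner.insert (ctr.getD st.2.2.1 0) (p.1, stripped)), st.2.2.1, ctr)
    else st
  else st

def find_headers_with_numbers (lines : List String) :
    (List (Int × Int × String)) × (List (Int × List (Int × Int × String))) :=
  let st := (PySem.List.enumerate lines 0).foldl find_headers_with_numbers_step
    (PySem.Dict.empty, PySem.Dict.empty, 0, PySem.Dict.empty)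
  (st.1.items, st.2.1.items.map (fun p => (p.1, p.2.items)))

-- ===== PORT B =====
def find_headers_with_numbers_alt (lines : List String) :
    (List (Int × Int × String)) × (List (Int × List (Int × Int × String))) :=
  let stripped := lines.map PySem.Str.strip
  let h1s := (PySem.List.enumerate stripped 0).filter (fun p => PySem.Str.startswith p.2 "# ")
  let h1_dict := PySem.List.enumerate h1s 1
  let nexts := PySem.List.slice (h1s.map (fun p => p.1) ++ [(lines.length : Int)]) (some 1) none
  let h2_dict := (PySem.List.enumerate (h1s.zip nexts) 1).filterMap (fun q =>
    let subs := (PySem.List.enumerate (PySem.List.slice stripped (some (q.2.1.1 + 1)) (some q.2.2)) (q.2.1.1 + 1)).filter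
      (fun r => PySem.Str.startswith r.2 "## ")
    if subs.isEmpty then none else some (q.1, PySem.List.enumerate subs 1))
  (h1_dict, h2_dict)

-- ===== PRECONDITION & SPEC =====
def Spec_find_headers_with_numbers (lines : List String) (out : (List (Int × Int × String)) × (List (Int × List (Int × Int × String)))) : Prop := out = find_headers_with_numbers_alt lines
instance (lines : List String) (out : (List (Int × Int × String)) × (List (Int × List (Int × Int × String)))) : Decidable (Spec_find_headers_with_numbers lines out) := by unfold Spec_find_headers_with_numbers; infer_instance

-- ===== CLAIM (what is proved, stated in full; the proofs are below) =====
def Claim_equal_find_headers_with_numbers : Prop := ∀ (lines : List String), Dom_find_headers_with_numbers lines → Spec_find_headers_with_numbers lines (find_headers_with_numbers lines)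

-- ===== LEMMAS AND PROOFS =====

-- named pieces of B's computation (used only by the proofs)
def isH1 (s : String) : Bool := PySem.Str.startswith s "# "
def isH2 (s : String) : Bool := PySem.Str.startswith s "## "
def sF (lines : List String) : List String := lines.map PySem.Str.strip
def h1sF (lines : List String) : List (Int × String) :=
  (PySem.List.enumerate (sF lines) 0).filter (fun p => isH1 p.2)
def nextsF (lines : List String) : List Int :=
  ((h1sF lines).map (fun p => p.1) ++ [(lines.length : Int)]).tail
def secsF (lines : List String) : List (Int × ((Int × String) × Int)) :=
  PySem.List.enumerate ((h1sF lines).zip (nextsF lines)) 1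
def subsF (lines : List String) (start fin : Int) : List (Int × String) :=
  (PySem.List.enumerate (PySem.List.slice (sF lines) (some (start + 1)) (some fin)) (start + 1)).filter
    (fun r => isH2 r.2)

lemma dict_contains_false {ν : Type} (M : List (Int × ν)) (k : Int)
    (h : ∀ p ∈ M, p.1 ≠ k) : (PySem.Dict.mk M).contains k = false := by
  simp only [PySem.Dict.contains_mk, List.any_eq_false]
  intro p hp
  simpa using h p hp

lemma dict_insert_fresh {ν : Type} (M : List (Int × ν)) (k : Int) (v : ν)
    (h : ∀ p ∈ M, p.1 ≠ k) : (PySem.Dict.mk M).insert k v = PySem.Dict.mk (M ++ [(k, v)]) := by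
  simp [PySem.Dict.insert, dict_contains_false M k h]

lemma dict_contains_append {ν : Type} (M : List (Int × ν)) (k : Int) (c : ν) :
    (PySem.Dict.mk (M ++ [(k, c)])).contains k = true := by
  simp [PySem.Dict.contains_mk]

lemma dict_get?_append {ν : Type} (M : List (Int × ν)) (k : Int) (c : ν)
    (h : ∀ p ∈ M, p.1 ≠ k) : (PySem.Dict.mk (M ++ [(k, c)])).get? k = some c := by
  induction M with
  | nil => simp [PySem.Dict.get?_mk_cons]
  | cons a t ih =>
    rw [List.cons_append, PySem.Dict.get?_mk_cons]
    have : (a.1 == k) = false := by simp; exact h a (by simp)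
    rw [this]
    simp only [ite_false, Bool.false_eq_true]
    exact ih (fun p hp => h p (by simp [hp]))

lemma dict_getD_append {ν : Type} (M : List (Int × ν)) (k : Int) (c d0 : ν)
    (h : ∀ p ∈ M, p.1 ≠ k) : (PySem.Dict.mk (M ++ [(k, c)])).getD k d0 = c := by
  simp [PySem.Dict.getD, dict_get?_append M k c h]

lemma dict_insert_append {ν : Type} (M : List (Int × ν)) (k : Int) (c v : ν)
    (h : ∀ p ∈ M, p.1 ≠ k) :
    (PySem.Dict.mk (M ++ [(k, c)])).insert k v = PySem.Dict.mk (M ++ [(k, v)]) := by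
  rw [PySem.Dict.insert]
  rw [dict_contains_append]
  simp only [if_true]
  congr 1
  have : (M ++ [(k, c)]).map (fun p => if (p.1 == k) = true then (k, v) else p) = M ++ [(k, v)] := by
    rw [List.map_append]
    congr 1
    · conv_rhs => rw [← List.map_id M]
      apply List.map_congr_left
      intro p hp
      simp [h p hp]
    · simp
  exact this

lemma dict_modify_append {ν : Type} (M : List (Int × ν)) (k : Int) (c d0 : ν) (f : ν → ν)
    (h : ∀ p ∈ M, p.1 ≠ k) :
    (PySem.Dict.mk (M ++ [(k, c)])).modify k d0 f = PySem.Dict.mk (M ++ [(k, f c)]) := by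
  rw [PySem.Dict.modify, dict_getD_append M k c d0 h, dict_insert_append M k c (f c) h]

lemma sF_append (xs : List String) (x : String) : sF (xs ++ [x]) = sF xs ++ [PySem.Str.strip x] := by
  simp [sF]

lemma length_sF (xs : List String) : (sF xs).length = xs.length := by simp [sF]

lemma h1sF_append (xs : List String) (x : String) :
    h1sF (xs ++ [x]) = h1sF xs ++ (if isH1 (PySem.Str.strip x) then [((xs.length : Int), PySem.Str.strip x)] else []) := by
  rw [h1sF, sF_append, PySem.List.enumerate_append, List.filter_append]
  rw [length_sF]
  congr 1
  simp [PySem.List.enumerate]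
  by_cases h : isH1 (PySem.Str.strip x) <;> simp [h]

lemma h1sF_mem_bound (xs : List String) (p : Int × String) (hp : p ∈ h1sF xs) :
    ∃ k : Nat, p.1 = (k : Int) ∧ k < xs.length := by
  rw [h1sF, List.mem_filter] at hp
  obtain ⟨hp1, _⟩ := hp
  rw [PySem.List.mem_enumerate_iff] at hp1
  obtain ⟨k, hk, hpe⟩ := hp1
  exact ⟨k, by simp [hpe], by simpa [length_sF] using hk⟩

lemma nextsF_mem_bound (xs : List String) (e : Int) (he : e ∈ nextsF xs) :
    0 ≤ e ∧ e ≤ (xs.length : Int) := by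
  rw [nextsF] at he
  have := List.mem_of_mem_tail he
  rw [List.mem_append] at this
  rcases this with h | h
  · rw [List.mem_map] at h
    obtain ⟨p, hp, hpe⟩ := h
    obtain ⟨k, hk1, hk2⟩ := h1sF_mem_bound xs p hp
    subst hpe; rw [hk1]
    constructor <;> [positivity; exact_mod_cast le_of_lt hk2]
  · simp at h; subst h; simp

lemma secsF_mem (xs : List String) (q : Int × ((Int × String) × Int)) (hq : q ∈ secsF xs) :
    q.2.1 ∈ h1sF xs ∧ q.2.2 ∈ nextsF xs ∧ 1 ≤ q.1 ∧ q.1 ≤ ((h1sF xs).length : Int) := by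
  rw [secsF, PySem.List.mem_enumerate_iff] at hq
  obtain ⟨k, hk, hqe⟩ := hq
  have hz : ((h1sF xs).zip (nextsF xs))[k] ∈ (h1sF xs).zip (nextsF xs) := List.getElem_mem hk
  have hmem : ((h1sF xs).zip (nextsF xs))[k].1 ∈ h1sF xs ∧ ((h1sF xs).zip (nextsF xs))[k].2 ∈ nextsF xs :=
    List.of_mem_zip hz
  have hlen : k < (h1sF xs).length := lt_of_lt_of_le hk (by simpa using List.length_zip_le_left ..)
  subst hqe
  refine ⟨hmem.1, hmem.2, by omega, ?_⟩
  have : (k : Int) < ((h1sF xs).length : Int) := by exact_mod_cast hlen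
  omega

lemma subsF_stable (xs : List String) (x : String) (start fin : Int)
    (h0 : 0 ≤ start) (h1 : start + 1 ≤ (xs.length : Int)) (h2 : 0 ≤ fin) (h3 : fin ≤ (xs.length : Int)) :
    subsF (xs ++ [x]) start fin = subsF xs start fin := by
  rw [subsF, subsF, sF_append]
  rw [PySem.List.slice_toNat _ (by omega) h2, PySem.List.slice_toNat _ (by omega) h2]
  have ha : (start + 1).toNat ≤ (sF xs).length := by rw [length_sF]; omega
  rw [List.drop_append_of_le_length ha]
  have hb : fin.toNat - (start + 1).toNat ≤ ((sF xs).drop (start + 1).toNat).length := by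
    rw [List.length_drop, length_sF]; omega
  rw [List.take_append_of_le_length hb]

lemma subsF_last (xs : List String) (x : String) (start : Int)
    (h0 : 0 ≤ start) (h1 : start + 1 ≤ (xs.length : Int)) :
    subsF (xs ++ [x]) start ((xs.length : Int) + 1)
      = subsF xs start (xs.length : Int)
        ++ (if isH2 (PySem.Str.strip x) then [((xs.length : Int), PySem.Str.strip x)] else []) := by
  rw [subsF, subsF, sF_append]
  rw [PySem.List.slice_toNat _ (by omega) (by omega), PySem.List.slice_toNat _ (by omega) (by omega)]
  have ha : (start + 1).toNat ≤ (sF xs).length := by rw [length_sF]; omega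
  rw [List.drop_append_of_le_length ha]
  have hd : ((sF xs).drop (start + 1).toNat).length = xs.length - (start + 1).toNat := by
    rw [List.length_drop, length_sF]
  have htake1 : (((sF xs).drop (start + 1).toNat) ++ [PySem.Str.strip x]).take (((xs.length : Int) + 1).toNat - (start + 1).toNat)
      = ((sF xs).drop (start + 1).toNat) ++ [PySem.Str.strip x] := by
    apply List.take_of_length_le
    simp only [List.length_append, List.length_cons, List.length_nil, hd]
    omega
  have htake2 : ((sF xs).drop (start + 1).toNat).take ((xs.length : Int).toNat - (start + 1).toNat)
      = (sF xs).drop (start + 1).toNat := by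
    apply List.take_of_length_le
    rw [hd]; omega
  rw [htake1, htake2, PySem.List.enumerate_append, List.filter_append]
  have hm : start + 1 + ((((sF xs).drop (start + 1).toNat).length : Nat) : Int) = (xs.length : Int) := by
    rw [hd]
    omega
  rw [hm]
  simp only [PySem.List.enumerate_cons, PySem.List.enumerate_nil, List.filter_cons, List.filter_nil]

lemma length_nextsF (xs : List String) : (nextsF xs).length = (h1sF xs).length := by
  simp [nextsF]

lemma secsF_append_h1 (xs : List String) (x : String) (hh : isH1 (PySem.Str.strip x) = true) :
    secsF (xs ++ [x]) = secsF xs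
      ++ [((((h1sF xs).length : Int) + 1), (((xs.length : Int), PySem.Str.strip x), (xs.length : Int) + 1))] := by
  have hmapfst : (h1sF (xs ++ [x])).map (fun p => p.1) = (h1sF xs).map (fun p => p.1) ++ [(xs.length : Int)] := by
    rw [h1sF_append, hh]
    simp
  have hnexts : nextsF (xs ++ [x]) = nextsF xs ++ [(xs.length : Int) + 1] := by
    rw [nextsF, hmapfst, List.tail_append]
    simp [nextsF]
  rw [secsF, h1sF_append, hh, hnexts]
  rw [List.zip_append (by rw [length_nextsF])]
  rw [PySem.List.enumerate_append]
  rw [show PySem.List.enumerate ((h1sF xs).zip (nextsF xs)) 1 = secsF xs from rfl]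
  congr 1
  rw [List.length_zip, length_nextsF, min_self]
  simp [PySem.List.enumerate_cons]
  omega

lemma h1sF_nil_of_append_not_h1 (xs : List String) (x : String) (hh : isH1 (PySem.Str.strip x) = false)
    (hnil : h1sF xs = []) : h1sF (xs ++ [x]) = [] ∧ secsF (xs ++ [x]) = [] ∧ secsF xs = [] := by
  have h1 : h1sF (xs ++ [x]) = [] := by rw [h1sF_append, hh]; simp [hnil]
  refine ⟨h1, ?_, ?_⟩
  · rw [secsF, h1]; simp
  · rw [secsF, hnil]; simp

lemma secsF_append_not_h1 (xs : List String) (x : String) (hh : isH1 (PySem.Str.strip x) = false)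
    (hne : h1sF xs ≠ []) :
    ∃ E hl, secsF xs = E ++ [(((h1sF xs).length : Int), (hl, (xs.length : Int)))]
      ∧ secsF (xs ++ [x]) = E ++ [(((h1sF xs).length : Int), (hl, (xs.length : Int) + 1))]
      ∧ hl ∈ h1sF xs
      ∧ (∀ q ∈ E, q ∈ secsF xs)
      ∧ (∀ q ∈ E, q.1 < ((h1sF xs).length : Int)) := by
  rcases (List.eq_nil_or_concat (h1sF xs)) with hcase | ⟨H, hl, hHl⟩
  · exact absurd hcase hne
  have hsame : h1sF (xs ++ [x]) = h1sF xs := by rw [h1sF_append, hh]; simp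
  rw [List.concat_eq_append] at hHl
  have hHlen : (h1sF xs).length = H.length + 1 := by rw [hHl]; simp
  have htail : ∀ (e : Int), (((h1sF xs).map (fun p => p.1)) ++ [e]).tail
      = ((h1sF xs).map (fun p => p.1)).tail ++ [e] := by
    intro e
    rw [List.tail_append]
    simp [List.isEmpty_iff, hne]
  have hlenC : (((h1sF xs).map (fun p => p.1)).tail).length = H.length := by
    simp [hHlen]
  have hzip : ∀ (e : Int), (h1sF xs).zip ((((h1sF xs).map (fun p => p.1)) ++ [e]).tail)
      = H.zip (((h1sF xs).map (fun p => p.1)).tail) ++ [(hl, e)] := by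
    intro e
    rw [htail e]
    rw [show (h1sF xs).zip (((h1sF xs).map (fun p => p.1)).tail ++ [e])
        = (H ++ [hl]).zip (((h1sF xs).map (fun p => p.1)).tail ++ [e]) from by rw [← hHl]]
    rw [List.zip_append (by rw [hlenC])]
    rfl
  refine ⟨PySem.List.enumerate (H.zip (((h1sF xs).map (fun p => p.1)).tail)) 1, hl, ?_, ?_, ?_, ?_, ?_⟩
  · rw [secsF, nextsF, hzip, PySem.List.enumerate_append]
    congr 1
    rw [List.length_zip, hlenC, min_self]
    simp [PySem.List.enumerate_cons, hHlen]
    omega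
  · rw [secsF, hsame, nextsF, hsame]
    have hlen1 : ((xs ++ [x]).length : Int) = (xs.length : Int) + 1 := by simp
    rw [hlen1, hzip, PySem.List.enumerate_append]
    congr 1
    rw [List.length_zip, hlenC, min_self]
    simp [PySem.List.enumerate_cons, hHlen]
    omega
  · rw [hHl]; simp
  · intro q hq
    rw [secsF, nextsF, hzip, PySem.List.enumerate_append]
    exact List.mem_append_left _ hq
  · intro q hq
    rw [PySem.List.mem_enumerate_iff] at hq
    obtain ⟨k, hk, hqe⟩ := hq
    rw [List.length_zip, hlenC, min_self] at hk
    rw [hqe, hHlen]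
    push_cast
    omega

lemma subsF_secs_stable (xs : List String) (x : String) (q : Int × ((Int × String) × Int))
    (hq : q ∈ secsF xs) : subsF (xs ++ [x]) q.2.1.1 q.2.2 = subsF xs q.2.1.1 q.2.2 := by
  obtain ⟨hq1, hq2, _, _⟩ := secsF_mem xs q hq
  obtain ⟨k, hk1, hk2⟩ := h1sF_mem_bound xs q.2.1 hq1
  obtain ⟨he1, he2⟩ := nextsF_mem_bound xs q.2.2 hq2
  apply subsF_stable xs x _ _ (by rw [hk1]; positivity) (by rw [hk1]; exact_mod_cast hk2) he1 he2

def fCtr (lines : List String) (q : Int × ((Int × String) × Int)) : Int × Int :=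
  (q.1, ((subsF lines q.2.1.1 q.2.2).length : Int))
def gH2 (lines : List String) (q : Int × ((Int × String) × Int)) : Option (Int × PySem.Dict Int (Int × String)) :=
  let subs := subsF lines q.2.1.1 q.2.2
  if subs.isEmpty then none else some (q.1, PySem.Dict.mk (PySem.List.enumerate subs 1))
def specState (lines : List String) :
    PySem.Dict Int (Int × String) × PySem.Dict Int (PySem.Dict Int (Int × String)) × Int × PySem.Dict Int Int :=
  (PySem.Dict.mk (PySem.List.enumerate (h1sF lines) 1),
   PySem.Dict.mk ((secsF lines).filterMap (gH2 lines)),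
   ((h1sF lines).length : Int),
   PySem.Dict.mk ((secsF lines).map (fCtr lines)))

lemma enum_key_bound {α : Type} (L : List α) (p : Int × α)
    (hp : p ∈ PySem.List.enumerate L 1) : 1 ≤ p.1 ∧ p.1 ≤ (L.length : Int) := by
  rw [PySem.List.mem_enumerate_iff] at hp
  obtain ⟨k, hk, hpe⟩ := hp
  rw [hpe]
  simp only []
  have : (k : Int) < (L.length : Int) := by exact_mod_cast hk
  constructor <;> [omega; omega]

lemma step_spec (xs : List String) (x : String) :
    find_headers_with_numbers_step (specState xs) ((xs.length : Int), x) = specState (xs ++ [x]) := by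
  rw [find_headers_with_numbers_step, specState, specState]
  simp only []
  by_cases hh1 : isH1 (PySem.Str.strip x)
  · have hhb : isH1 (PySem.Str.strip x) = true := hh1
    rw [isH1] at hh1
    simp only [hh1, if_true]
    have hfresh1 : ∀ p ∈ PySem.List.enumerate (h1sF xs) 1, p.1 ≠ ((h1sF xs).length : Int) + 1 := by
      intro p hp
      have := enum_key_bound (h1sF xs) p hp
      omega
    have hfresh2 : ∀ p ∈ (secsF xs).map (fCtr xs), p.1 ≠ ((h1sF xs).length : Int) + 1 := by
      intro p hp
      rw [List.mem_map] at hp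
      obtain ⟨q, hq, hqe⟩ := hp
      have hb := (secsF_mem xs q hq).2.2.2
      rw [← hqe]
      simp only [fCtr]
      omega
    rw [show ({ items := PySem.List.enumerate (h1sF xs) 1 } : PySem.Dict Int (Int × String)).insert (((h1sF xs).length : Int) + 1) ((xs.length : Int), PySem.Str.strip x) = PySem.Dict.mk (PySem.List.enumerate (h1sF xs) 1 ++ [((((h1sF xs).length : Int) + 1), ((xs.length : Int), PySem.Str.strip x))]) from dict_insert_fresh _ _ _ hfresh1]
    rw [show ({ items := List.map (fCtr xs) (secsF xs) } : PySem.Dict Int Int).insert (((h1sF xs).length : Int) + 1) 0 = PySem.Dict.mk (List.map (fCtr xs) (secsF xs) ++ [((((h1sF xs).length : Int) + 1), (0 : Int))]) from dict_insert_fresh _ _ _ hfresh2]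
    have hsub0 : subsF (xs ++ [x]) (xs.length : Int) ((xs.length : Int) + 1) = [] := by
      rw [subsF, PySem.List.slice_toNat _ (by omega) (by omega)]
      simp [PySem.List.enumerate_nil]
    rw [h1sF_append, secsF_append_h1 xs x hhb]
    simp only [isH1, hh1, if_true]
    simp only [Prod.mk.injEq, PySem.Dict.mk.injEq]
    refine ⟨?_, ?_, ?_, ?_⟩
    · rw [PySem.List.enumerate_append]
      rw [show (1 : Int) + (((h1sF xs).length : Nat) : Int) = (((h1sF xs).length : Nat) : Int) + 1 from by omega]
      simp [PySem.List.enumerate_cons]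
    · rw [List.filterMap_append]
      have h2 : List.filterMap (gH2 (xs ++ [x])) (secsF xs) = List.filterMap (gH2 xs) (secsF xs) := by
        apply List.filterMap_congr
        intro q hq
        simp only [gH2, subsF_secs_stable xs x q hq]
      rw [h2]
      have h3 : gH2 (xs ++ [x]) ((((h1sF xs).length : Int) + 1), (((xs.length : Int), PySem.Str.strip x), (xs.length : Int) + 1)) = none := by
        simp only [gH2, hsub0]
        simp
      simp [h3]
    · simp
    · rw [List.map_append]
      have h4 : List.map (fCtr (xs ++ [x])) (secsF xs) = List.map (fCtr xs) (secsF xs) := by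
        apply List.map_congr_left
        intro q hq
        simp only [fCtr, subsF_secs_stable xs x q hq]
      rw [h4]
      have h5 : fCtr (xs ++ [x]) ((((h1sF xs).length : Int) + 1), (((xs.length : Int), PySem.Str.strip x), (xs.length : Int) + 1)) = ((((h1sF xs).length : Int) + 1), (0 : Int)) := by
        simp only [fCtr, hsub0]
        simp
      simp [h5]
  · have hhb : isH1 (PySem.Str.strip x) = false := by
      revert hh1
      cases isH1 (PySem.Str.strip x) <;> simp
    have hhb' : PySem.Str.startswith (PySem.Str.strip x) "# " = false := hhb
    simp only [hhb', Bool.false_eq_true, if_false]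
    by_cases hnil : h1sF xs = []
    · -- no h1 yet: the state is empty and stays empty
      obtain ⟨h1', hs', hs⟩ := h1sF_nil_of_append_not_h1 xs x hhb hnil
      rw [hnil, hs, h1', hs']
      simp only [List.length_nil, Nat.cast_zero, List.filterMap_nil, List.map_nil,
        PySem.List.enumerate_nil]
      split <;> norm_num
    · -- at least one h1: decompose the section list
      obtain ⟨E, hl, hsecs, hsecs', hlmem, hEmem, hElt⟩ := secsF_append_not_h1 xs x hhb hnil
      have hsame : h1sF (xs ++ [x]) = h1sF xs := by rw [h1sF_append, hhb]; simp
      obtain ⟨k, hk1, hk2⟩ := h1sF_mem_bound xs hl hlmem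
      have hlast : subsF (xs ++ [x]) hl.1 ((xs.length : Int) + 1)
          = subsF xs hl.1 (xs.length : Int)
            ++ (if isH2 (PySem.Str.strip x) then [((xs.length : Int), PySem.Str.strip x)] else []) :=
        subsF_last xs x hl.1 (by rw [hk1]; positivity) (by rw [hk1]; exact_mod_cast hk2)
      have hEcongr : ∀ (lines' : List String), lines' = xs ++ [x] →
          List.map (fCtr lines') E = List.map (fCtr xs) E := by
        intro lines' hl'
        subst hl'
        apply List.map_congr_left
        intro q hq
        simp only [fCtr, subsF_secs_stable xs x q (hEmem q hq)]
      have hEcongr2 : List.filterMap (gH2 (xs ++ [x])) E = List.filterMap (gH2 xs) E := by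
        apply List.filterMap_congr
        intro q hq
        simp only [gH2, subsF_secs_stable xs x q (hEmem q hq)]
      have hFMEkey : ∀ p ∈ List.filterMap (gH2 xs) E, p.1 < ((h1sF xs).length : Int) := by
        intro p hp
        rw [List.mem_filterMap] at hp
        obtain ⟨q, hq, hgq⟩ := hp
        rw [gH2] at hgq
        by_cases hc : (subsF xs q.2.1.1 q.2.2).isEmpty
        · simp [hc] at hgq
        · simp [hc] at hgq
          rw [← hgq]
          exact hElt q hq
      by_cases hh2 : isH2 (PySem.Str.strip x)
      · -- an h2 line extends the last section
        have hh2b : isH2 (PySem.Str.strip x) = true := hh2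
        have hh2c : PySem.Str.startswith (PySem.Str.strip x) "## " = true := hh2b
        simp only [hh2c, if_true]
        have hpos : ((0:Int) < ((h1sF xs).length : Int)) := by
          have : h1sF xs ≠ [] := hnil
          have : 0 < (h1sF xs).length := List.length_pos_of_ne_nil this
          exact_mod_cast this
        rw [if_pos hpos]
        rw [hh2b] at hlast
        simp only [if_true] at hlast
        have hkeysE : ∀ p ∈ List.map (fCtr xs) E, p.1 ≠ ((h1sF xs).length : Int) := by
          intro p hp
          rw [List.mem_map] at hp
          obtain ⟨q, hq, hqe⟩ := hp
          rw [← hqe]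
          simp only [fCtr]
          have := hElt q hq
          omega
        have hmapsecs : List.map (fCtr xs) (secsF xs)
            = List.map (fCtr xs) E ++ [(((h1sF xs).length : Int), ((subsF xs hl.1 (xs.length : Int)).length : Int))] := by
          rw [hsecs, List.map_append]
          simp only [List.map_cons, List.map_nil, fCtr]
        have hctr : ({ items := List.map (fCtr xs) (secsF xs) } : PySem.Dict Int Int).modify ((h1sF xs).length : Int) 0 (· + 1)
            = PySem.Dict.mk (List.map (fCtr xs) E ++ [(((h1sF xs).length : Int), ((subsF xs hl.1 (xs.length : Int)).length : Int) + 1)]) := by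
          rw [show ({ items := List.map (fCtr xs) (secsF xs) } : PySem.Dict Int Int) = PySem.Dict.mk (List.map (fCtr xs) (secsF xs)) from rfl, hmapsecs]
          exact dict_modify_append _ _ _ _ _ hkeysE
        rw [hctr]
        have hgetD : (PySem.Dict.mk (List.map (fCtr xs) E ++ [(((h1sF xs).length : Int), ((subsF xs hl.1 (xs.length : Int)).length : Int) + 1)])).getD ((h1sF xs).length : Int) 0
            = ((subsF xs hl.1 (xs.length : Int)).length : Int) + 1 :=
          dict_getD_append _ _ _ _ hkeysE
        rw [hgetD]
        -- right-hand sides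
        have hctr' : List.map (fCtr (xs ++ [x])) (secsF (xs ++ [x]))
            = List.map (fCtr xs) E ++ [(((h1sF xs).length : Int), ((subsF xs hl.1 (xs.length : Int)).length : Int) + 1)] := by
          rw [hsecs', List.map_append, hEcongr _ rfl]
          simp only [List.map_cons, List.map_nil, fCtr]
          rw [hlast]
          simp only [List.length_append, List.length_cons, List.length_nil]
          push_cast
          ring_nf
        have hfm : List.filterMap (gH2 xs) (secsF xs)
            = List.filterMap (gH2 xs) E
              ++ (if (subsF xs hl.1 (xs.length : Int)).isEmpty then []
                  else [(((h1sF xs).length : Int), PySem.Dict.mk (PySem.List.enumerate (subsF xs hl.1 (xs.length : Int)) 1))]) := by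
          rw [hsecs, List.filterMap_append]
          simp only [List.filterMap_cons, List.filterMap_nil, gH2]
          by_cases hS : (subsF xs hl.1 (xs.length : Int)).isEmpty <;> simp [hS]
        have hfm' : List.filterMap (gH2 (xs ++ [x])) (secsF (xs ++ [x]))
            = List.filterMap (gH2 xs) E
              ++ [(((h1sF xs).length : Int), PySem.Dict.mk (PySem.List.enumerate (subsF xs hl.1 (xs.length : Int) ++ [((xs.length : Int), PySem.Str.strip x)]) 1))] := by
          rw [hsecs', List.filterMap_append, hEcongr2]
          simp only [List.filterMap_cons, List.filterMap_nil, gH2]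
          rw [hlast]
          simp
        rw [hfm, hfm', hsame, hctr']
        simp only [Prod.mk.injEq, and_true, true_and]
        by_cases hS : (subsF xs hl.1 (xs.length : Int)).isEmpty
        · have hSnil : subsF xs hl.1 (xs.length : Int) = [] := by
            rwa [List.isEmpty_iff] at hS
          rw [if_pos hS, List.append_nil]
          have hcf : (PySem.Dict.mk (List.filterMap (gH2 xs) E)).contains ((h1sF xs).length : Int) = false := by
            apply dict_contains_false
            intro p hp
            have := hFMEkey p hp
            omega
          rw [show ({ items := List.filterMap (gH2 xs) E } : PySem.Dict Int (PySem.Dict Int (Int × String))) = PySem.Dict.mk (List.filterMap (gH2 xs) E) from rfl]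
          rw [hcf]
          simp only [Bool.false_eq_true, if_false]
          rw [dict_insert_fresh _ _ _ (by intro p hp; have := hFMEkey p hp; omega)]
          rw [dict_modify_append _ _ _ _ _ (by intro p hp; have := hFMEkey p hp; omega)]
          rw [hSnil]
          simp only [List.length_nil, Nat.cast_zero, zero_add, List.nil_append]
          rfl
        · have hS' : (subsF xs hl.1 (xs.length : Int)).isEmpty = false := by
            revert hS
            cases (subsF xs hl.1 (xs.length : Int)).isEmpty <;> simp
          rw [if_neg hS]
          rw [show ({ items := List.filterMap (gH2 xs) E ++ [(((h1sF xs).length : Int), PySem.Dict.mk (PySem.List.enumerate (subsF xs hl.1 (xs.length : Int)) 1))] } : PySem.Dict Int (PySem.Dict Int (Int × String))) = PySem.Dict.mk (List.filterMap (gH2 xs) E ++ [(((h1sF xs).length : Int), PySem.Dict.mk (PySem.List.enumerate (subsF xs hl.1 (xs.length : Int)) 1))]) from rfl]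
          rw [dict_contains_append]
          simp only [if_true]
          rw [dict_modify_append _ _ _ _ _ (by intro p hp; have := hFMEkey p hp; omega)]
          have hinner : (PySem.Dict.mk (PySem.List.enumerate (subsF xs hl.1 (xs.length : Int)) 1)).insert (((subsF xs hl.1 (xs.length : Int)).length : Int) + 1) ((xs.length : Int), PySem.Str.strip x)
              = PySem.Dict.mk (PySem.List.enumerate (subsF xs hl.1 (xs.length : Int) ++ [((xs.length : Int), PySem.Str.strip x)]) 1) := by
            rw [dict_insert_fresh _ _ _ (by
              intro p hp
              have := enum_key_bound _ p hp
              omega)]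
            rw [PySem.List.enumerate_append]
            rw [show (1 : Int) + (((subsF xs hl.1 (xs.length : Int)).length : Nat) : Int) = ((subsF xs hl.1 (xs.length : Int)).length : Int) + 1 from by omega]
            simp [PySem.List.enumerate_cons]
          rw [hinner]
      · -- neither h1 nor h2: nothing changes
        have hh2b : isH2 (PySem.Str.strip x) = false := by
          revert hh2
          cases isH2 (PySem.Str.strip x) <;> simp
        have hh2c : PySem.Str.startswith (PySem.Str.strip x) "## " = false := hh2b
        simp only [hh2c, Bool.false_eq_true, if_false]
        rw [hh2b] at hlast
        simp only [Bool.false_eq_true, if_false, List.append_nil] at hlast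
        simp only [Prod.mk.injEq, PySem.Dict.mk.injEq]
        refine ⟨?_, ?_, ?_, ?_⟩
        · rw [hsame]
        · rw [hsecs, hsecs', List.filterMap_append, List.filterMap_append, hEcongr2]
          have hg : gH2 (xs ++ [x]) ((((h1sF xs).length : Int)), (hl, (xs.length : Int) + 1))
              = gH2 xs ((((h1sF xs).length : Int)), (hl, (xs.length : Int))) := by
            simp only [gH2]
            rw [hlast]
          have hsing : List.filterMap (gH2 (xs ++ [x])) [((((h1sF xs).length : Int)), (hl, (xs.length : Int) + 1))]
              = List.filterMap (gH2 xs) [((((h1sF xs).length : Int)), (hl, (xs.length : Int)))] := by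
            simp only [List.filterMap_cons, List.filterMap_nil, hg]
          rw [hsing]
        · rw [hsame]
        · rw [hsecs, hsecs', List.map_append, List.map_append, hEcongr _ rfl]
          have hf : fCtr (xs ++ [x]) ((((h1sF xs).length : Int)), (hl, (xs.length : Int) + 1))
              = fCtr xs ((((h1sF xs).length : Int)), (hl, (xs.length : Int))) := by
            simp only [fCtr]
            rw [hlast]
          have hsing2 : List.map (fCtr (xs ++ [x])) [((((h1sF xs).length : Int)), (hl, (xs.length : Int) + 1))]
              = List.map (fCtr xs) [((((h1sF xs).length : Int)), (hl, (xs.length : Int)))] := by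
            simp only [List.map_cons, List.map_nil, hf]
          rw [hsing2]

lemma foldA_spec (lines : List String) :
    (PySem.List.enumerate lines 0).foldl find_headers_with_numbers_step
      (PySem.Dict.empty, PySem.Dict.empty, 0, PySem.Dict.empty) = specState lines := by
  induction lines using List.reverseRecOn with
  | nil => rfl
  | append_singleton xs x ih =>
    rw [PySem.List.enumerate_append, List.foldl_append, ih]
    simp only [PySem.List.enumerate_cons, PySem.List.enumerate_nil, List.foldl_cons, List.foldl_nil]
    rw [show (0 : Int) + (xs.length : Int) = (xs.length : Int) from by omega]
    exact step_spec xs x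

lemma final_eq (lines : List String) : find_headers_with_numbers lines = find_headers_with_numbers_alt lines := by
  rw [find_headers_with_numbers]
  rw [foldA_spec, specState]
  rw [find_headers_with_numbers_alt]
  simp only [PySem.List.slice_from_one]
  simp only [Prod.mk.injEq]
  constructor
  · rfl
  · rw [List.map_filterMap]
    apply List.filterMap_congr
    intro q hq
    simp only [gH2]
    by_cases hS : (subsF lines q.2.1.1 q.2.2).isEmpty
    · simp only [hS, if_true, Option.map_none]
      rw [show ((PySem.List.enumerate (PySem.List.slice (lines.map PySem.Str.strip) (some (q.2.1.1 + 1)) (some q.2.2)) (q.2.1.1 + 1)).filter (fun r => PySem.Str.startswith r.2 "## ")) = subsF lines q.2.1.1 q.2.2 from rfl, hS]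
      simp
    · have hS' : (subsF lines q.2.1.1 q.2.2).isEmpty = false := by
        revert hS
        cases (subsF lines q.2.1.1 q.2.2).isEmpty <;> simp
      simp only [hS', Bool.false_eq_true, if_false, Option.map_some]
      rw [show ((PySem.List.enumerate (PySem.List.slice (lines.map PySem.Str.strip) (some (q.2.1.1 + 1)) (some q.2.2)) (q.2.1.1 + 1)).filter (fun r => PySem.Str.startswith r.2 "## ")) = subsF lines q.2.1.1 q.2.2 from rfl, hS']
      simp

-- ===== VERDICT (by name: the statement is the Claim_ definition above) =====
theorem find_headers_with_numbers_spec : Claim_equal_find_headers_with_numbers := by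
  intro lines _
  unfold Spec_find_headers_with_numbers
  exact final_eq lines
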